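-- pv_equiv track=rewrite | github.com/a42228a42228/espnet | espnet2/text/phoneme_tokenizer.py | _preprocess_continuous_symbols
-- ===== SOURCE A (Python) =====
-- def _preprocess_continuous_symbols(a, special_symbols):
--     """
--     將連續的特殊符號替換為唯一的單一標記，並記錄原始連續符號的位置與內容。
--
--     :param a: 序列 a。
--     :param special_symbols: 特殊符號集合。
--     :return: 處理後的序列和連續特殊符號的替換記錄。
--     """
--     processed_a = []
--     replacements = {}
--     i = 0
--     marker_id = 0  # 用於生成唯一標記
--
--     while i < len(a):
--         if a[i] in special_symbols:
--             start = i
--             while i < len(a) and a[i] in special_symbols: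
--                 i += 1
--             # 替換連續特殊符號為唯一標記
--             replacement_marker = f"<SYM_{marker_id}>"
--             marker_id += 1
--             processed_a.append(replacement_marker)
--             replacements[replacement_marker] = a[start:i]  # 記錄替換
--         else:
--             processed_a.append(a[i])
--             i += 1
--     return processed_a, replacements
-- ===== SOURCE B (Python) =====
-- def _preprocess_continuous_symbols(a, special_symbols):
--     # Run-length encode a by "is special", then emit one marker per special run.
--     runs = []  # list of [is_special, length]
--     for x in a:
--         k = x in special_symbols
--         if runs and runs[-1][0] == k:
--             runs[-1][1] += 1
--         else:
--             runs.append([k, 1])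
--     processed_a = []
--     replacements = {}
--     pos = 0
--     marker_id = 0
--     for k, n in runs:
--         if k:
--             marker = f"<SYM_{marker_id}>"
--             marker_id += 1
--             processed_a.append(marker)
--             replacements[marker] = a[pos:pos + n]
--         else:
--             processed_a.extend(a[pos:pos + n])
--         pos += n
--     return processed_a, replacements
-- ===== Notes on version B (the rewrite author's own statement) =====
-- stated objective: alternative
-- what changed: Replaces the index-driven nested while loops with a two-phase pass: first run-length encode the sequence by specialness, then emit markers/slices per run.
import Mathlib
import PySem

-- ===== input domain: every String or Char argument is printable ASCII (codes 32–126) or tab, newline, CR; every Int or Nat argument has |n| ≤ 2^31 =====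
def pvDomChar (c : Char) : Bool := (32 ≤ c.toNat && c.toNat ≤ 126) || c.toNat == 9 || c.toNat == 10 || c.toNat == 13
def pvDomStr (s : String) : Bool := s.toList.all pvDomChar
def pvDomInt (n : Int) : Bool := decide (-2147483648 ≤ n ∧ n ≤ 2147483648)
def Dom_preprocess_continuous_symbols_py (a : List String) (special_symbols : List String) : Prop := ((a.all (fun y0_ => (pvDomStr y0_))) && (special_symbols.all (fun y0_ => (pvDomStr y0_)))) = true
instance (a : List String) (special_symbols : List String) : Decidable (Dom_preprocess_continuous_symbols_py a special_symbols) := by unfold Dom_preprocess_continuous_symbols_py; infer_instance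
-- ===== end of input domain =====

-- B replaces A's index-driven nested while loops by a two-phase pass (run-length encode by
-- specialness, then emit per run); objective: alternative structure, same cost.

-- ===== PORT A =====
-- inner 'while i < len(a) and a[i] in special_symbols: i += 1' (returns final i)
def pvScanEnd (a special_symbols : List String) (i : Nat) : Nat :=
  if h : i < a.length then
    if special_symbols.contains a[i] then pvScanEnd a special_symbols (i + 1) else i
  else i
termination_by a.length - i

theorem pvScanEnd_ge (a special_symbols : List String) (i : Nat) :
    i ≤ pvScanEnd a special_symbols i := by
  unfold pvScanEnd
  split
  · split
    · exact le_trans (Nat.le_succ i) (pvScanEnd_ge a special_symbols (i + 1))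
    · exact le_refl i
  · exact le_refl i
termination_by a.length - i

-- outer while loop of A, threading (i, marker_id, processed_a, replacements)
def pvLoopA (a special_symbols : List String) (i : Nat) (marker_id : Int)
    (processed : List String) (repl : PySem.Dict String (List String)) :
    List String × PySem.Dict String (List String) :=
  if h : i < a.length then
    if special_symbols.contains a[i] then
      -- start = i; inner while advances i to pvScanEnd
      let j := pvScanEnd a special_symbols i
      let marker := "<SYM_" ++ PySem.Int.toStr marker_id ++ ">"
      -- a[start:i] with 0 ≤ start ≤ i ≤ len a: exactly (a.drop start).take (i - start)
      pvLoopA a special_symbols j (marker_id + 1) (processed ++ [marker])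
        (repl.insert marker ((a.drop i).take (j - i)))
    else
      pvLoopA a special_symbols (i + 1) marker_id (processed ++ [a[i]]) repl
  else (processed, repl)
termination_by a.length - i
decreasing_by
  · have h1 : i + 1 ≤ pvScanEnd a special_symbols (i + 1) := pvScanEnd_ge a special_symbols (i + 1)
    have h2 : pvScanEnd a special_symbols i = pvScanEnd a special_symbols (i + 1) := by
      conv_lhs => unfold pvScanEnd
      simp_all
    omega
  · omega

def preprocess_continuous_symbols_py (a : List String) (special_symbols : List String) :
    List String × (List (String × List String)) :=
  let r := pvLoopA a special_symbols 0 0 [] PySem.Dict.empty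
  (r.1, r.2.items)

-- ===== PORT B =====
-- phase 1 step: extend the run list by one element's key (runs[-1][1] += 1 or append [k,1])
def pvAddRun (runs : List (Bool × Nat)) (k : Bool) : List (Bool × Nat) :=
  match runs.getLast? with
  | some (k', n) => if k' == k then runs.dropLast ++ [(k', n + 1)] else runs ++ [(k, 1)]
  | none => runs ++ [(k, 1)]

-- phase 2 loop: per run emit a marker (special) or the slice a[pos:pos+n] (not special)
def pvEmit (a : List String) (runs : List (Bool × Nat)) (processed : List String)
    (repl : PySem.Dict String (List String)) (pos : Nat) (marker_id : Int) :
    List String × PySem.Dict String (List String) :=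
  match runs with
  | [] => (processed, repl)
  | (k, n) :: rs =>
    if k then
      let marker := "<SYM_" ++ PySem.Int.toStr marker_id ++ ">"
      pvEmit a rs (processed ++ [marker]) (repl.insert marker ((a.drop pos).take n))
        (pos + n) (marker_id + 1)
    else
      pvEmit a rs (processed ++ (a.drop pos).take n) repl (pos + n) marker_id

def preprocess_continuous_symbols_py_alt (a : List String) (special_symbols : List String) :
    List String × (List (String × List String)) :=
  let runs := a.foldl (fun rs x => pvAddRun rs (special_symbols.contains x)) []
  let r := pvEmit a runs [] PySem.Dict.empty 0 0
  (r.1, r.2.items)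

-- ===== PRECONDITION & SPEC =====
def Spec_preprocess_continuous_symbols_py (a : List String) (special_symbols : List String) (out : List String × (List (String × List String))) : Prop := out = preprocess_continuous_symbols_py_alt a special_symbols
instance (a : List String) (special_symbols : List String) (out : List String × (List (String × List String))) : Decidable (Spec_preprocess_continuous_symbols_py a special_symbols out) := by unfold Spec_preprocess_continuous_symbols_py; infer_instance

-- ===== CLAIM (what is proved, stated in full; the proofs are below) =====
def Claim_equal_preprocess_continuous_symbols_py : Prop := ∀ (a : List String) (special_symbols : List String), Dom_preprocess_continuous_symbols_py a special_symbols → Spec_preprocess_continuous_symbols_py a special_symbols (preprocess_continuous_symbols_py a special_symbols)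

-- ===== LEMMAS AND PROOFS =====

-- cons-style run-extension: what the foldl of pvAddRun builds past a last run (k, n)
def pvExtendRuns (key : String → Bool) (k : Bool) (n : Nat) : List String → List (Bool × Nat)
  | [] => [(k, n)]
  | x :: xs => if key x = k then pvExtendRuns key k (n + 1) xs
               else (k, n) :: pvExtendRuns key (key x) 1 xs

-- run list of a (possibly empty) suffix, cons-style
def pvRuns (key : String → Bool) : List String → List (Bool × Nat)
  | [] => []
  | x :: xs => pvExtendRuns key (key x) 1 xs

theorem pvFoldl_addRun (key : String → Bool) (xs : List String) :
    ∀ (rs : List (Bool × Nat)) (k : Bool) (n : Nat),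
    List.foldl (fun r x => pvAddRun r (key x)) (rs ++ [(k, n)]) xs
      = rs ++ pvExtendRuns key k n xs := by
  induction xs with
  | nil => intro rs k n; simp [pvExtendRuns]
  | cons x xs ih =>
    intro rs k n
    simp only [List.foldl_cons]
    have hlast : (rs ++ [(k, n)]).getLast? = some (k, n) := by
      simp [List.getLast?_append]
    by_cases hk : key x = k
    · have : pvAddRun (rs ++ [(k, n)]) (key x) = rs ++ [(k, n + 1)] := by
        simp [pvAddRun, hlast, hk]
      rw [this, ih rs k (n + 1), pvExtendRuns, if_pos hk]
    · have : pvAddRun (rs ++ [(k, n)]) (key x) = (rs ++ [(k, n)]) ++ [(key x, 1)] := by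
        simp [pvAddRun, hlast, Ne.symm hk]
      rw [this, ih (rs ++ [(k, n)]) (key x) 1, pvExtendRuns, if_neg hk, List.append_assoc]
      rfl

theorem pvFoldl_runs (key : String → Bool) (xs : List String) :
    List.foldl (fun r x => pvAddRun r (key x)) [] xs = pvRuns key xs := by
  cases xs with
  | nil => rfl
  | cons x xs =>
    simp only [List.foldl_cons]
    have h0 : pvAddRun [] (key x) = [] ++ [(key x, 1)] := by simp [pvAddRun]
    rw [h0, pvFoldl_addRun key xs [] (key x) 1]
    rfl

-- scanEnd of the non-special analogue (first index ≥ i whose element is NOT special / is special)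
def pvFEnd (a special_symbols : List String) (i : Nat) : Nat :=
  if h : i < a.length then
    if special_symbols.contains a[i] then i else pvFEnd a special_symbols (i + 1)
  else i
termination_by a.length - i

theorem pvFEnd_ge (a special_symbols : List String) (i : Nat) :
    i ≤ pvFEnd a special_symbols i := by
  unfold pvFEnd
  split
  · split
    · exact le_refl i
    · exact le_trans (Nat.le_succ i) (pvFEnd_ge a special_symbols (i + 1))
  · exact le_refl i
termination_by a.length - i

-- the head run of a suffix, special case
theorem pvExtend_true (a special_symbols : List String) (i : Nat) (n : Nat) :
    pvExtendRuns (fun x => special_symbols.contains x) true n (a.drop i)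
      = (true, (pvScanEnd a special_symbols i - i) + n)
        :: pvRuns (fun x => special_symbols.contains x) (a.drop (pvScanEnd a special_symbols i)) := by
  by_cases h : i < a.length
  · have hd : a.drop i = a[i] :: a.drop (i + 1) := List.drop_eq_getElem_cons h
    by_cases hk : special_symbols.contains a[i] = true
    · have hs : pvScanEnd a special_symbols i = pvScanEnd a special_symbols (i + 1) := by
        conv_lhs => unfold pvScanEnd
        rw [dif_pos h, if_pos hk]
      have hge : i + 1 ≤ pvScanEnd a special_symbols (i + 1) := pvScanEnd_ge a special_symbols (i + 1)
      rw [hd, pvExtendRuns, if_pos hk]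
      rw [pvExtend_true a special_symbols (i + 1) (n + 1), hs]
      congr 2
      omega
    · have hs : pvScanEnd a special_symbols i = i := by
        conv_lhs => unfold pvScanEnd
        rw [dif_pos h, if_neg hk]
      rw [hs]
      conv_lhs => rw [hd, pvExtendRuns, if_neg (by simpa using hk)]
      rw [hd]
      simp only [pvRuns, Nat.sub_self, Nat.zero_add]
  · have hd : a.drop i = [] := List.drop_eq_nil_of_le (by omega)
    have hs : pvScanEnd a special_symbols i = i := by unfold pvScanEnd; simp [h]
    rw [hd, hs, hd]
    simp [pvExtendRuns, pvRuns]
termination_by a.length - i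
decreasing_by omega

-- the head run of a suffix, non-special case
theorem pvExtend_false (a special_symbols : List String) (i : Nat) (n : Nat) :
    pvExtendRuns (fun x => special_symbols.contains x) false n (a.drop i)
      = (false, (pvFEnd a special_symbols i - i) + n)
        :: pvRuns (fun x => special_symbols.contains x) (a.drop (pvFEnd a special_symbols i)) := by
  by_cases h : i < a.length
  · have hd : a.drop i = a[i] :: a.drop (i + 1) := List.drop_eq_getElem_cons h
    by_cases hk : special_symbols.contains a[i] = true
    · have hs : pvFEnd a special_symbols i = i := by
        conv_lhs => unfold pvFEnd
        rw [dif_pos h, if_pos hk]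
      rw [hs]
      conv_lhs => rw [hd, pvExtendRuns, if_neg (by simpa using hk)]
      rw [hd]
      simp only [pvRuns, Nat.sub_self, Nat.zero_add]
    · have hs : pvFEnd a special_symbols i = pvFEnd a special_symbols (i + 1) := by
        conv_lhs => unfold pvFEnd
        rw [dif_pos h, if_neg hk]
      have hge : i + 1 ≤ pvFEnd a special_symbols (i + 1) := pvFEnd_ge a special_symbols (i + 1)
      rw [hd, pvExtendRuns, if_pos (by simpa using hk)]
      rw [pvExtend_false a special_symbols (i + 1) (n + 1), hs]
      congr 2
      omega
  · have hd : a.drop i = [] := List.drop_eq_nil_of_le (by omega)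
    have hs : pvFEnd a special_symbols i = i := by unfold pvFEnd; simp [h]
    rw [hd, hs, hd]
    simp [pvExtendRuns, pvRuns]
termination_by a.length - i
decreasing_by omega

-- A's element-by-element copying of a non-special run equals appending the whole slice at once
theorem pvLoopA_false_run (a special_symbols : List String) (i : Nat) (marker_id : Int)
    (processed : List String) (repl : PySem.Dict String (List String)) :
    pvLoopA a special_symbols i marker_id processed repl
      = pvLoopA a special_symbols (pvFEnd a special_symbols i) marker_id
          (processed ++ (a.drop i).take (pvFEnd a special_symbols i - i)) repl := by
  by_cases h : i < a.length
  · by_cases hk : special_symbols.contains a[i] = true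
    · have hs : pvFEnd a special_symbols i = i := by
        conv_lhs => unfold pvFEnd
        rw [dif_pos h, if_pos hk]
      rw [hs]; simp
    · have hs : pvFEnd a special_symbols i = pvFEnd a special_symbols (i + 1) := by
        conv_lhs => unfold pvFEnd
        rw [dif_pos h, if_neg hk]
      have hge : i + 1 ≤ pvFEnd a special_symbols (i + 1) := pvFEnd_ge a special_symbols (i + 1)
      conv_lhs => unfold pvLoopA
      rw [dif_pos h, if_neg hk]
      rw [pvLoopA_false_run a special_symbols (i + 1) marker_id (processed ++ [a[i]]) repl, hs]
      congr 1
      have hd : a.drop i = a[i] :: a.drop (i + 1) := List.drop_eq_getElem_cons h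
      rw [hd, List.append_assoc]
      congr 1
      have : pvFEnd a special_symbols (i + 1) - i = (pvFEnd a special_symbols (i + 1) - (i + 1)) + 1 := by omega
      rw [this, List.take_succ_cons]
      rfl
  · have hs : pvFEnd a special_symbols i = i := by unfold pvFEnd; simp [h]
    rw [hs]; simp
termination_by a.length - i
decreasing_by omega

-- main correspondence: A's outer loop at index i equals B's emit over the runs of drop i
theorem pvLoopA_eq_emit (a special_symbols : List String) (i : Nat) (marker_id : Int)
    (processed : List String) (repl : PySem.Dict String (List String)) :
    pvLoopA a special_symbols i marker_id processed repl
      = pvEmit a (pvRuns (fun x => special_symbols.contains x) (a.drop i))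
          processed repl i marker_id := by
  by_cases h : i < a.length
  · have hd : a.drop i = a[i] :: a.drop (i + 1) := List.drop_eq_getElem_cons h
    by_cases hk : special_symbols.contains a[i] = true
    · -- special run
      have hs : pvScanEnd a special_symbols i = pvScanEnd a special_symbols (i + 1) := by
        conv_lhs => unfold pvScanEnd
        rw [dif_pos h, if_pos hk]
      have hge : i + 1 ≤ pvScanEnd a special_symbols i := by
        rw [hs]; exact pvScanEnd_ge a special_symbols (i + 1)
      have hruns : pvRuns (fun x => special_symbols.contains x) (a.drop i)
          = (true, pvScanEnd a special_symbols i - i)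
            :: pvRuns (fun x => special_symbols.contains x) (a.drop (pvScanEnd a special_symbols i)) := by
        rw [hd]
        show pvExtendRuns _ (special_symbols.contains a[i]) 1 (a.drop (i + 1)) = _
        rw [hk, pvExtend_true a special_symbols (i + 1) 1, ← hs]
        congr 2
        omega
      conv_lhs => unfold pvLoopA
      rw [dif_pos h, if_pos hk]
      rw [pvLoopA_eq_emit a special_symbols (pvScanEnd a special_symbols i) (marker_id + 1) _ _]
      rw [hruns, pvEmit, if_pos rfl]
      congr 1
      omega
    · -- non-special run
      have hs : pvFEnd a special_symbols i = pvFEnd a special_symbols (i + 1) := by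
        conv_lhs => unfold pvFEnd
        rw [dif_pos h, if_neg hk]
      have hge : i + 1 ≤ pvFEnd a special_symbols i := by
        rw [hs]; exact pvFEnd_ge a special_symbols (i + 1)
      have hruns : pvRuns (fun x => special_symbols.contains x) (a.drop i)
          = (false, pvFEnd a special_symbols i - i)
            :: pvRuns (fun x => special_symbols.contains x) (a.drop (pvFEnd a special_symbols i)) := by
        rw [hd]
        show pvExtendRuns _ (special_symbols.contains a[i]) 1 (a.drop (i + 1)) = _
        rw [(by simpa using hk : special_symbols.contains a[i] = false)]
        rw [pvExtend_false a special_symbols (i + 1) 1, ← hs]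
        congr 2
        omega
      rw [pvLoopA_false_run a special_symbols i marker_id processed repl]
      rw [pvLoopA_eq_emit a special_symbols (pvFEnd a special_symbols i) marker_id _ _]
      rw [hruns, pvEmit, if_neg (by simp)]
      congr 1
      omega
  · have hd : a.drop i = [] := List.drop_eq_nil_of_le (by omega)
    rw [hd]
    unfold pvLoopA
    simp [h, pvRuns, pvEmit]
termination_by a.length - i
decreasing_by all_goals omega

-- ===== VERDICT (by name: the statement is the Claim_ definition above) =====
theorem preprocess_continuous_symbols_py_spec : Claim_equal_preprocess_continuous_symbols_py := by
  intro a special_symbols _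
  show _ = _
  unfold preprocess_continuous_symbols_py preprocess_continuous_symbols_py_alt
  rw [pvFoldl_runs (fun x => special_symbols.contains x) a,
      pvLoopA_eq_emit a special_symbols 0 0 [] PySem.Dict.empty, List.drop_zero]
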